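-- pv_equiv track=rewrite | github.com/dr-jgsmith/hypergraph | hypergraph.py | get_thetas
-- ===== SOURCE A (Python) =====
-- def get_thetas(matrix):
--     nums = []
--     for i in matrix:
--         mn = min(i)
--         nums.append(mn)
--         mx = max(i)
--         nums.append(mx)
--     thetas = list(range(min(nums), max(nums)+1))
--     return thetas
-- ===== SOURCE B (Python) =====
-- def get_thetas(matrix):
--     flat = sorted(v for row in matrix for v in row)
--     lo, hi = flat[0], flat[-1]
--     thetas = []
--     while lo <= hi:
--         thetas.append(lo)
--         lo += 1
--     return thetas
-- ===== Notes on version B (the rewrite author's own statement) =====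
-- stated objective: alternative
-- what changed: B flattens the matrix, sorts the flat list and takes its two endpoints as the global min/max (instead of A's interleaved per-row min/max list reduced by min/max), then builds the range with an explicit while loop instead of range().
import Mathlib
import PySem

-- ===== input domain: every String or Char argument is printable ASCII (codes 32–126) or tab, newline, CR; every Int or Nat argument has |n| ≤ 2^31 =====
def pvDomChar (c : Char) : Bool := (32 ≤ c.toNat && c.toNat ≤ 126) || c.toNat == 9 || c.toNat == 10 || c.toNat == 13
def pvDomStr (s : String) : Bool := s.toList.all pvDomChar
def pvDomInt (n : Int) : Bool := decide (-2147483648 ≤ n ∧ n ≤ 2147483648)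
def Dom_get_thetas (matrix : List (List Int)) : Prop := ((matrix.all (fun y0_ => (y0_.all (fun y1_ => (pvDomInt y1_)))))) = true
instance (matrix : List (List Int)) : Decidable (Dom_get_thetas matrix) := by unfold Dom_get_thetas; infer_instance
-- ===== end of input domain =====

-- B sorts the flattened matrix and takes its endpoints as global min/max (vs A's interleaved per-row min/max list), then builds the range with an explicit loop; alternative algorithm, same outputs on Pre_.


-- ===== PORT A =====
def get_thetas (matrix : List (List Int)) : List Int :=
  let nums := matrix.foldl (fun nums i =>
    let mn := (PySem.List.min? i (fun y => y)).getD 0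
    let mx := (PySem.List.max? i (fun y => y)).getD 0
    (nums ++ [mn]) ++ [mx]) []
  match PySem.List.min? nums (fun y => y), PySem.List.max? nums (fun y => y) with
  | some lo, some hi => PySem.List.pyRange lo (hi + 1) 1
  | _, _ => []   -- unreachable under Pre_ (A raises ValueError there)

-- ===== PORT B =====
-- the while loop 'while lo <= hi: thetas.append(lo); lo += 1' of Source B (fuel = iteration count, for totality only)
def pvBuild : Nat → Int → Int → List Int
  | 0, _, _ => []
  | f + 1, lo, hi => if lo ≤ hi then lo :: pvBuild f (lo + 1) hi else []

def get_thetas_alt (matrix : List (List Int)) : List Int :=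
  let flat := PySem.List.sorted (matrix.flatMap (fun row => row)) (fun y => y)
  match PySem.List.pyGet? flat 0 with
  | none => []   -- unreachable under Pre_ (Source B's flat[0] raises IndexError there)
  | some lo =>
    match PySem.List.pyGet? flat (-1) with
    | none => []
    | some hi => pvBuild (hi + 1 - lo).toNat lo hi

-- ===== PRECONDITION & SPEC =====
-- A raises ValueError on an empty matrix or any empty row (min()/max() of an empty sequence); exactly those inputs are excluded.
def Pre_get_thetas (matrix : List (List Int)) : Prop := matrix ≠ [] ∧ ∀ r ∈ matrix, r ≠ []
instance (matrix : List (List Int)) : Decidable (Pre_get_thetas matrix) := by unfold Pre_get_thetas; infer_instance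
def pvWitness_get_thetas : List (List Int) := [[1, 4], [0, 2]]
def Spec_get_thetas (matrix : List (List Int)) (out : List Int) : Prop := out = get_thetas_alt matrix
instance (matrix : List (List Int)) (out : List Int) : Decidable (Spec_get_thetas matrix out) := by unfold Spec_get_thetas; infer_instance

-- ===== CLAIM (what is proved, stated in full; the proofs are below) =====
def Claim_equal_get_thetas : Prop := ∀ (matrix : List (List Int)), Dom_get_thetas matrix → Pre_get_thetas matrix → Spec_get_thetas matrix (get_thetas matrix)

-- ===== LEMMAS AND PROOFS =====

-- per-row min/max with A's default (never used under Pre_)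
def pvMnD (r : List Int) : Int := (PySem.List.min? r (fun y => y)).getD 0
def pvMxD (r : List Int) : Int := (PySem.List.max? r (fun y => y)).getD 0

lemma pvMnD_mem {r : List Int} (h : r ≠ []) : pvMnD r ∈ r := by
  cases hmn : PySem.List.min? r (fun y => y) with
  | none => exact absurd ((PySem.List.min?_eq_none_iff r (fun y => y)).mp hmn) h
  | some mn => simpa [pvMnD, hmn] using PySem.List.min?_mem hmn

lemma pvMxD_mem {r : List Int} (h : r ≠ []) : pvMxD r ∈ r := by
  cases hmx : PySem.List.max? r (fun y => y) with
  | none => exact absurd ((PySem.List.max?_eq_none_iff r (fun y => y)).mp hmx) h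
  | some mx => simpa [pvMxD, hmx] using PySem.List.max?_mem hmx

lemma pvMnD_le {r : List Int} {x : Int} (hx : x ∈ r) : pvMnD r ≤ x := by
  cases hmn : PySem.List.min? r (fun y => y) with
  | none => exact absurd ((PySem.List.min?_eq_none_iff r (fun y => y)).mp hmn) (by rintro rfl; cases hx)
  | some mn => simpa [pvMnD, hmn] using PySem.List.min?_isMin hmn x hx

lemma pvLe_mxD {r : List Int} {x : Int} (hx : x ∈ r) : x ≤ pvMxD r := by
  cases hmx : PySem.List.max? r (fun y => y) with
  | none => exact absurd ((PySem.List.max?_eq_none_iff r (fun y => y)).mp hmx) (by rintro rfl; cases hx)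
  | some mx => simpa [pvMxD, hmx] using PySem.List.max?_isMax hmx x hx

-- A's nums list in closed form
lemma pvNums_eq (l : List (List Int)) (acc : List Int) :
    l.foldl (fun nums i =>
      let mn := (PySem.List.min? i (fun y => y)).getD 0
      let mx := (PySem.List.max? i (fun y => y)).getD 0
      (nums ++ [mn]) ++ [mx]) acc = acc ++ l.flatMap (fun i => [pvMnD i, pvMxD i]) := by
  induction l generalizing acc with
  | nil => simp
  | cons r t ih => simp [pvMnD, pvMxD, List.flatMap]

-- Source B's while loop is exactly range(lo, hi+1)
lemma pvRange_nil (lo hi : Int) (h : hi < lo) : PySem.List.pyRange lo (hi + 1) 1 = [] := by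
  simp [PySem.List.pyRange]; omega

lemma pvBuild_eq (f : Nat) (lo hi : Int) (hf : (hi + 1 - lo).toNat ≤ f) :
    pvBuild f lo hi = PySem.List.pyRange lo (hi + 1) 1 := by
  induction f generalizing lo with
  | zero => rw [pvBuild, pvRange_nil _ _ (by omega)]
  | succ f ih =>
    rw [pvBuild]
    split
    · rw [PySem.List.pyRange_one_cons (by omega), ih (lo + 1) (by omega)]
    · rw [pvRange_nil _ _ (by omega)]

-- in a ≤-pairwise list the last element bounds every element
lemma pvPairwise_le_getLast? : ∀ (l : List Int),
    l.Pairwise (· ≤ ·) → ∀ x ∈ l, ∀ y, l.getLast? = some y → x ≤ y := by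
  intro l
  induction l with
  | nil => intro _ x hx; cases hx
  | cons a t ih =>
    intro hp x hx y hy
    cases t with
    | nil =>
      simp at hx hy; omega
    | cons b s =>
      rw [List.getLast?_cons_cons] at hy
      rcases List.mem_cons.mp hx with rfl | hxt
      · exact le_trans (List.rel_of_pairwise_cons hp (by simp))
          (ih (List.Pairwise.of_cons hp) b (by simp) y hy)
      · exact ih (List.Pairwise.of_cons hp) x hxt y hy

-- ===== VERDICT (by name: the statement is the Claim_ definition above) =====
theorem get_thetas_spec : Claim_equal_get_thetas := by
  intro matrix _ hpre
  obtain ⟨hne, hrows⟩ := hpre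
  show get_thetas matrix = get_thetas_alt matrix
  -- flat is nonempty
  have hflatne : matrix.flatMap (fun row => row) ≠ [] := by
    obtain ⟨r, t, rfl⟩ := List.exists_cons_of_ne_nil hne
    have hr := hrows r (by simp)
    obtain ⟨x, s, rfl⟩ := List.exists_cons_of_ne_nil hr
    simp
  set flat := matrix.flatMap (fun row => row) with hflat
  obtain ⟨m, srest, hsorted⟩ :
      ∃ m srest, PySem.List.sorted flat (fun y => y) = m :: srest := by
    cases hs : PySem.List.sorted flat (fun y => y) with
    | nil => exact absurd ((PySem.List.sorted_eq_nil_iff flat (fun y => y) false).mp hs) hflatne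
    | cons a b => exact ⟨a, b, rfl⟩
  have hsne : PySem.List.sorted flat (fun y => y) ≠ [] := by simp [hsorted]
  -- B's endpoints
  set L := (PySem.List.sorted flat (fun y => y)).getLast hsne with hL
  have hLq : (PySem.List.sorted flat (fun y => y)).getLast? = some L := by
    rw [hL]; exact List.getLast?_eq_some_getLast hsne
  have hB : get_thetas_alt matrix = PySem.List.pyRange m (L + 1) 1 := by
    unfold get_thetas_alt
    rw [← hflat]
    show (match PySem.List.pyGet? (PySem.List.sorted flat (fun y => y)) 0 with
          | none => []
          | some lo =>
            match PySem.List.pyGet? (PySem.List.sorted flat (fun y => y)) (-1) with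
            | none => []
            | some hi => pvBuild (hi + 1 - lo).toNat lo hi) = _
    rw [PySem.List.pyGet?_neg_one, PySem.List.pyGet?_zero, hLq, hsorted]
    simp only [List.getElem?_cons_zero]
    exact pvBuild_eq _ _ _ le_rfl
  have hm_mem : m ∈ flat := by
    rw [← PySem.List.mem_sorted flat (fun y => y) false, hsorted]; simp
  have hm_min : ∀ y ∈ flat, m ≤ y := by
    intro y hy
    exact PySem.List.key_head_sorted_le flat (fun y => y) hsorted y hy
  have hL_mem : L ∈ flat := by
    rw [← PySem.List.mem_sorted flat (fun y => y) false]
    exact List.getLast_mem hsne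
  have hL_max : ∀ y ∈ flat, y ≤ L := by
    intro y hy
    exact pvPairwise_le_getLast? _ (PySem.List.sorted_pairwise flat (fun y => y)) y
      ((PySem.List.mem_sorted flat (fun y => y) false y).mpr hy) L hLq
  set nums := matrix.flatMap (fun i => [pvMnD i, pvMxD i]) with hnumsdef
  have hnums_sub : ∀ y ∈ nums, y ∈ flat := by
    intro y hy
    rw [hnumsdef, List.mem_flatMap] at hy
    obtain ⟨r, hr, hy⟩ := hy
    have hrne := hrows r hr
    rw [hflat, List.mem_flatMap]
    refine ⟨r, hr, ?_⟩
    simp at hy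
    rcases hy with rfl | rfl
    · exact pvMnD_mem hrne
    · exact pvMxD_mem hrne
  have hflat_dom : ∀ x ∈ flat, ∃ y ∈ nums, y ≤ x ∧ ∃ z ∈ nums, x ≤ z := by
    intro x hx
    rw [hflat, List.mem_flatMap] at hx
    obtain ⟨r, hr, hx⟩ := hx
    refine ⟨pvMnD r, by rw [hnumsdef, List.mem_flatMap]; exact ⟨r, hr, by simp⟩,
      pvMnD_le hx, pvMxD r, by rw [hnumsdef, List.mem_flatMap]; exact ⟨r, hr, by simp⟩,
      pvLe_mxD hx⟩
  have hnumsne : nums ≠ [] := by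
    intro h
    obtain ⟨y, hy, _⟩ := hflat_dom m hm_mem
    rw [h] at hy; cases hy
  -- A's min?/max? of nums give exactly m and L
  obtain ⟨a, ha⟩ : ∃ a, PySem.List.min? nums (fun y => y) = some a := by
    cases h : PySem.List.min? nums (fun y => y) with
    | none => exact absurd ((PySem.List.min?_eq_none_iff nums (fun y => y)).mp h) hnumsne
    | some a => exact ⟨a, rfl⟩
  obtain ⟨b, hb⟩ : ∃ b, PySem.List.max? nums (fun y => y) = some b := by
    cases h : PySem.List.max? nums (fun y => y) with
    | none => exact absurd ((PySem.List.max?_eq_none_iff nums (fun y => y)).mp h) hnumsne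
    | some b => exact ⟨b, rfl⟩
  have ha_eq : a = m := by
    have h1 : m ≤ a := hm_min a (hnums_sub a (PySem.List.min?_mem ha))
    have h2 : a ≤ m := by
      obtain ⟨y, hy, hyx, _⟩ := hflat_dom m hm_mem
      exact le_trans (by simpa using PySem.List.min?_isMin ha y hy) hyx
    omega
  have hb_eq : b = L := by
    have h1 : b ≤ L := hL_max b (hnums_sub b (PySem.List.max?_mem hb))
    have h2 : L ≤ b := by
      obtain ⟨y, hy, hyx, z, hz, hxz⟩ := hflat_dom L hL_mem
      exact le_trans hxz (by simpa using PySem.List.max?_isMax hb z hz)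
    omega
  -- conclude
  unfold get_thetas
  rw [pvNums_eq, List.nil_append, ← hnumsdef]
  show (match PySem.List.min? nums (fun y => y), PySem.List.max? nums (fun y => y) with
        | some lo, some hi => PySem.List.pyRange lo (hi + 1) 1
        | _, _ => []) = _
  rw [ha, hb, hB, ha_eq, hb_eq]
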